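-- pv_equiv track=rewrite | github.com/ITGourmand/bigNumber | bigNumber.py | compare_blocks
-- ===== SOURCE A (Python) =====
-- def compare_blocks(a, b):
--     """Retourne 1 si a>b, 0 si a==b, -1 si a<b"""
--     keys = sorted(set(a.keys()) | set(b.keys()), reverse=True)
--     for k in keys:
--         av = a.get(k, 0)
--         bv = b.get(k, 0)
--         if av > bv:
--             return 1
--         elif av < bv:
--             return -1
--     return 0
-- ===== SOURCE B (Python) =====
-- def compare_blocks(a, b):
--     """Retourne 1 si a>b, 0 si a==b, -1 si a<b"""
--     # single pass: keep the largest key whose two values differ, and the sign there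
--     best = None
--     sign = 0
--     for k in a:
--         av = a.get(k, 0)
--         bv = b.get(k, 0)
--         if av != bv and (best is None or best < k):
--             best = k
--             sign = 1 if bv < av else -1
--     for k in b:
--         if k not in a:
--             bv = b.get(k, 0)
--             if bv != 0 and (best is None or best < k):
--                 best = k
--                 sign = 1 if bv < 0 else -1
--     return sign
-- ===== Notes on version B (the rewrite author's own statement) =====
-- stated objective: alternative
-- what changed: Instead of building and sorting the union of key sets and scanning it in descending order for the first differing value, B makes one linear pass over each dict keeping the largest key whose two values differ and the comparison sign at that key (O(n) scan vs sort-then-scan, though not measurably faster in CPython where the sort is native).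
import Mathlib
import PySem

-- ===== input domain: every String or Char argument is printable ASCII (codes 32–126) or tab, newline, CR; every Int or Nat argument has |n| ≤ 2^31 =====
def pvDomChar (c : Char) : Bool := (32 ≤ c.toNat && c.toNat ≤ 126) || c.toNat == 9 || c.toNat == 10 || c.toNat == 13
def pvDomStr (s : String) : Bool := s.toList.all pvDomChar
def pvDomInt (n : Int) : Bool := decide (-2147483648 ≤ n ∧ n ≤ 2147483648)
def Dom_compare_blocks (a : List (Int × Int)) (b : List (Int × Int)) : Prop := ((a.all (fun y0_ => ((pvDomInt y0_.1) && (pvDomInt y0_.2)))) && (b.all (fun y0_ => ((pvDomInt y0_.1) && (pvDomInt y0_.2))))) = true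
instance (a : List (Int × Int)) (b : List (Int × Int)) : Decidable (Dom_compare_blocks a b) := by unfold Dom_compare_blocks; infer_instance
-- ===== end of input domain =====

-- B replaces sort-the-union-of-keys-then-scan by one linear pass keeping the largest differing key.

-- shared helper: d.get(k, 0) on an association list (first match)
def cbGetD (d : List (Int × Int)) (k : Int) : Int :=
  match d.find? (fun p => p.1 == k) with
  | some p => p.2
  | none => 0

-- ===== PORT A =====
-- the 'for k in keys: … return …' loop
def cbLoopA (a b : List (Int × Int)) : List Int → Int
  | [] => 0
  | k :: ks =>
    let av := cbGetD a k
    let bv := cbGetD b k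
    if av > bv then 1
    else if av < bv then -1
    else cbLoopA a b ks

def compare_blocks (a : List (Int × Int)) (b : List (Int × Int)) : Int :=
  let keys := PySem.List.sorted
    (PySem.Set.union (PySem.Set.ofList (a.map Prod.fst)) (b.map Prod.fst))
    (fun k => k) true
  cbLoopA a b keys

-- ===== PORT B =====
-- first loop: for k in a
def cbStep1 (a b : List (Int × Int)) (acc : Option Int × Int) (k : Int) : Option Int × Int :=
  let av := cbGetD a k
  let bv := cbGetD b k
  if (av != bv) && (match acc.1 with | none => true | some bk => decide (bk < k)) then
    (some k, if bv < av then 1 else -1)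
  else acc

-- second loop: for k in b, if k not in a
def cbStep2 (a b : List (Int × Int)) (acc : Option Int × Int) (k : Int) : Option Int × Int :=
  if (a.find? (fun p => p.1 == k)).isNone then
    let bv := cbGetD b k
    if (bv != 0) && (match acc.1 with | none => true | some bk => decide (bk < k)) then
      (some k, if bv < 0 then 1 else -1)
    else acc
  else acc

def compare_blocks_alt (a : List (Int × Int)) (b : List (Int × Int)) : Int :=
  ((b.map Prod.fst).foldl (cbStep2 a b)
    ((a.map Prod.fst).foldl (cbStep1 a b) (none, 0))).2

-- ===== PRECONDITION & SPEC =====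
def Spec_compare_blocks (a : List (Int × Int)) (b : List (Int × Int)) (out : Int) : Prop := out = compare_blocks_alt a b
instance (a : List (Int × Int)) (b : List (Int × Int)) (out : Int) : Decidable (Spec_compare_blocks a b out) := by unfold Spec_compare_blocks; infer_instance

-- ===== CLAIM (what is proved, stated in full; the proofs are below) =====
def Claim_equal_compare_blocks : Prop := ∀ (a : List (Int × Int)) (b : List (Int × Int)), Dom_compare_blocks a b → Spec_compare_blocks a b (compare_blocks a b)

-- ===== LEMMAS AND PROOFS =====

-- comparison sign at one key
def cbSgn (a b : List (Int × Int)) (k : Int) : Int :=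
  if cbGetD b k < cbGetD a k then 1 else if cbGetD a k < cbGetD b k then -1 else 0

def cbDiff (a b : List (Int × Int)) (k : Int) : Bool := cbGetD a k != cbGetD b k

def omax : Option Int → Option Int → Option Int
  | none, y => y
  | x, none => x
  | some x, some y => some (max x y)

def maxd : List Int → Option Int
  | [] => none
  | x :: t => omax (some x) (maxd t)

def osgn (a b : List (Int × Int)) : Option Int → Int
  | none => 0
  | some k => cbSgn a b k

theorem omax_none_right (x : Option Int) : omax x none = x := by
  cases x <;> rfl

theorem omax_none_left (y : Option Int) : omax none y = y := rfl

theorem omax_assoc (x y z : Option Int) : omax (omax x y) z = omax x (omax y z) := by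
  cases x <;> cases y <;> cases z <;> simp [omax, max_assoc]

theorem maxd_eq_none {l : List Int} : maxd l = none ↔ l = [] := by
  cases l with
  | nil => simp [maxd]
  | cons x t => simp only [maxd]; cases maxd t <;> simp [omax]

theorem maxd_mem {l : List Int} {m : Int} (h : maxd l = some m) : m ∈ l := by
  induction l with
  | nil => simp [maxd] at h
  | cons x t ih =>
    simp only [maxd] at h
    cases ht : maxd t with
    | none => rw [ht] at h; simp [omax] at h; simp [h]
    | some n =>
      rw [ht] at h
      simp only [omax, Option.some.injEq] at h
      rcases max_choice x n with hc | hc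
      · rw [hc] at h; simp [h]
      · rw [hc] at h; subst h; exact List.mem_cons_of_mem _ (ih ht)

theorem maxd_ge {l : List Int} {m : Int} (h : maxd l = some m) : ∀ y ∈ l, y ≤ m := by
  induction l generalizing m with
  | nil => simp
  | cons x t ih =>
    intro y hy
    simp only [maxd] at h
    cases ht : maxd t with
    | none =>
      rw [ht] at h; simp [omax] at h
      rcases List.mem_cons.1 hy with rfl | hyt
      · omega
      · rw [maxd_eq_none.1 ht] at hyt; simp at hyt
    | some n =>
      rw [ht] at h
      simp only [omax, Option.some.injEq] at h
      rcases List.mem_cons.1 hy with rfl | hyt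
      · subst h; exact le_max_left _ _
      · subst h; exact le_trans (ih ht y hyt) (le_max_right _ _)

theorem maxd_eq_some_iff {l : List Int} {m : Int} :
    maxd l = some m ↔ m ∈ l ∧ ∀ y ∈ l, y ≤ m := by
  constructor
  · intro h; exact ⟨maxd_mem h, maxd_ge h⟩
  · rintro ⟨hm, hub⟩
    cases hl : maxd l with
    | none => rw [maxd_eq_none] at hl; subst hl; simp at hm
    | some n =>
      have hn := maxd_mem hl
      have := maxd_ge hl m hm
      have := hub n hn
      congr 1; omega

-- maxd depends only on membership
theorem maxd_congr {l l' : List Int} (h : ∀ x, x ∈ l ↔ x ∈ l') : maxd l = maxd l' := by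
  cases hl : maxd l with
  | none =>
    rw [maxd_eq_none] at hl; subst hl
    symm; rw [maxd_eq_none]
    cases l' with
    | nil => rfl
    | cons x t => exact absurd ((h x).2 (List.mem_cons_self)) (by simp)
  | some m =>
    symm
    rw [maxd_eq_some_iff]
    exact ⟨(h m).1 (maxd_mem hl), fun y hy => maxd_ge hl y ((h y).2 hy)⟩

theorem maxd_append (l l' : List Int) : maxd (l ++ l') = omax (maxd l) (maxd l') := by
  induction l with
  | nil => rfl
  | cons x t ih => simp only [List.cons_append, maxd, ih, omax_assoc]

-- inside the first loop, the stored sign is the sign at the stored key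
theorem foldl_step1 (a b : List (Int × Int)) :
    ∀ (l : List Int) (acc : Option Int × Int), acc.2 = osgn a b acc.1 →
      l.foldl (cbStep1 a b) acc =
        (omax acc.1 (maxd (l.filter (cbDiff a b))),
         osgn a b (omax acc.1 (maxd (l.filter (cbDiff a b))))) := by
  intro l
  induction l with
  | nil =>
    intro acc hacc
    simp only [List.foldl_nil, List.filter_nil, maxd, omax_none_right]
    exact Prod.ext rfl hacc
  | cons x t ih =>
    intro acc hacc
    simp only [List.foldl_cons, List.filter_cons]
    by_cases hd : cbDiff a b x = true
    · simp only [hd, if_pos trivial, maxd]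
      have hsx : (if cbGetD b x < cbGetD a x then (1:Int) else -1) = cbSgn a b x := by
        unfold cbDiff at hd
        unfold cbSgn
        simp only [bne_iff_ne, ne_eq] at hd
        split_ifs <;> omega
      cases hacc1 : acc.1 with
      | none =>
        have hstep : cbStep1 a b acc x = (some x, if cbGetD b x < cbGetD a x then 1 else -1) := by
          unfold cbStep1; unfold cbDiff at hd
          simp [hacc1, hd]
        rw [hstep, ih _ (by simp only [osgn, hsx])]
        simp [omax]
      | some bk =>
        by_cases hlt : bk < x
        · have hstep : cbStep1 a b acc x = (some x, if cbGetD b x < cbGetD a x then 1 else -1) := by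
            unfold cbStep1; unfold cbDiff at hd
            simp [hacc1, hd, hlt]
          rw [hstep, ih _ (by simp only [osgn, hsx])]
          have : omax (some bk) (omax (some x) (maxd (t.filter (cbDiff a b))))
              = omax (some x) (maxd (t.filter (cbDiff a b))) := by
            rw [← omax_assoc]
            simp only [omax]
            rw [max_eq_right (le_of_lt hlt)]
          rw [this]
        · have hstep : cbStep1 a b acc x = acc := by
            unfold cbStep1; unfold cbDiff at hd
            simp [hacc1, hd, hlt]
          rw [hstep, ih _ hacc]
          have : omax (some bk) (omax (some x) (maxd (t.filter (cbDiff a b))))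
              = omax (some bk) (maxd (t.filter (cbDiff a b))) := by
            rw [← omax_assoc]
            simp only [omax]
            rw [max_eq_left (by omega)]
          rw [this, hacc1]
    · have hd' : cbDiff a b x = false := by simpa using hd
      have hstep : cbStep1 a b acc x = acc := by
        unfold cbStep1; unfold cbDiff at hd'
        simp [hd']
      rw [hstep, ih _ hacc, hd']
      simp

-- the test of the second loop, as one predicate
def cbDiff2 (a b : List (Int × Int)) (k : Int) : Bool :=
  (a.find? (fun p => p.1 == k)).isNone && (cbGetD b k != 0)

theorem cbGetD_of_find?_none {a : List (Int × Int)} {k : Int}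
    (h : (a.find? (fun p => p.1 == k)).isNone) : cbGetD a k = 0 := by
  unfold cbGetD
  cases hf : a.find? (fun p => p.1 == k) with
  | none => rfl
  | some p => rw [hf] at h; simp at h

theorem foldl_step2 (a b : List (Int × Int)) :
    ∀ (l : List Int) (acc : Option Int × Int), acc.2 = osgn a b acc.1 →
      l.foldl (cbStep2 a b) acc =
        (omax acc.1 (maxd (l.filter (cbDiff2 a b))),
         osgn a b (omax acc.1 (maxd (l.filter (cbDiff2 a b))))) := by
  intro l
  induction l with
  | nil =>
    intro acc hacc
    simp only [List.foldl_nil, List.filter_nil, maxd, omax_none_right]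
    exact Prod.ext rfl hacc
  | cons x t ih =>
    intro acc hacc
    simp only [List.foldl_cons, List.filter_cons]
    by_cases hd : cbDiff2 a b x = true
    · unfold cbDiff2 at hd
      simp only [Bool.and_eq_true] at hd
      obtain ⟨hnone, hbv⟩ := hd
      have ha0 : cbGetD a x = 0 := cbGetD_of_find?_none hnone
      have hbv' : cbGetD b x ≠ 0 := by simpa using hbv
      have hsx : (if cbGetD b x < 0 then (1:Int) else -1) = cbSgn a b x := by
        unfold cbSgn; rw [ha0]; split_ifs <;> omega
      have hfilter : cbDiff2 a b x = true := by
        unfold cbDiff2; simp [hnone, hbv]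
      simp only [hfilter, if_pos trivial, maxd]
      cases hacc1 : acc.1 with
      | none =>
        have hstep : cbStep2 a b acc x = (some x, if cbGetD b x < 0 then 1 else -1) := by
          unfold cbStep2
          simp [hnone, hacc1, hbv']
        rw [hstep, ih _ (by simp only [osgn, hsx])]
        simp [omax]
      | some bk =>
        by_cases hlt : bk < x
        · have hstep : cbStep2 a b acc x = (some x, if cbGetD b x < 0 then 1 else -1) := by
            unfold cbStep2
            simp [hnone, hacc1, hbv', hlt]
          rw [hstep, ih _ (by simp only [osgn, hsx])]
          have : omax (some bk) (omax (some x) (maxd (t.filter (cbDiff2 a b))))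
              = omax (some x) (maxd (t.filter (cbDiff2 a b))) := by
            rw [← omax_assoc]; simp only [omax]; rw [max_eq_right (le_of_lt hlt)]
          rw [this]
        · have hstep : cbStep2 a b acc x = acc := by
            unfold cbStep2
            simp [hnone, hacc1, hlt]
          rw [hstep, ih _ hacc]
          have : omax (some bk) (omax (some x) (maxd (t.filter (cbDiff2 a b))))
              = omax (some bk) (maxd (t.filter (cbDiff2 a b))) := by
            rw [← omax_assoc]; simp only [omax]; rw [max_eq_left (by omega)]
          rw [this, hacc1]
    · have hd' : cbDiff2 a b x = false := by simpa using hd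
      have hstep : cbStep2 a b acc x = acc := by
        unfold cbStep2 cbDiff2 at *
        rcases Bool.and_eq_false_iff.1 hd' with h1 | h2
        · simp [h1]
        · cases hf : (a.find? (fun p => p.1 == x)).isNone
          · simp [hf]
          · rw [hf] at hd'
            simp only [Bool.true_and] at hd'
            simp [hd']
      rw [hstep, ih _ hacc, hd']
      simp

-- A's scan of a strictly descending key list returns the sign at the largest differing key
theorem loopA_eq (a b : List (Int × Int)) :
    ∀ (L : List Int), L.Pairwise (fun p q => q < p) →
      cbLoopA a b L = osgn a b (maxd (L.filter (cbDiff a b))) := by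
  intro L
  induction L with
  | nil => intro _; rfl
  | cons k ks ih =>
    intro hp
    rw [List.pairwise_cons] at hp
    obtain ⟨hk, hks⟩ := hp
    have hmaxk : cbDiff a b k = true →
        maxd (List.filter (cbDiff a b) (k :: ks)) = some k := by
      intro hd
      simp only [List.filter_cons, hd, if_pos trivial, maxd]
      cases hm : maxd (ks.filter (cbDiff a b)) with
      | none => rfl
      | some m =>
        have hmk : m < k := hk m (List.mem_of_mem_filter (maxd_mem hm))
        simp only [omax, Option.some.injEq]
        omega
    simp only [cbLoopA]
    by_cases h1 : cbGetD b k < cbGetD a k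
    · have hd : cbDiff a b k = true := by unfold cbDiff; simp; omega
      rw [if_pos h1, hmaxk hd]
      simp only [osgn, cbSgn]
      rw [if_pos h1]
    · by_cases h2 : cbGetD a k < cbGetD b k
      · have hd : cbDiff a b k = true := by unfold cbDiff; simp; omega
        rw [if_neg h1, if_pos h2, hmaxk hd]
        simp only [osgn, cbSgn]
        rw [if_neg h1, if_pos h2]
      · have hd : cbDiff a b k = false := by unfold cbDiff; simp; omega
        rw [if_neg h1, if_neg h2]
        simp only [List.filter_cons, hd, Bool.false_eq_true, if_false]
        exact ih hks

-- membership bridge between the two differing-key lists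
theorem filter_mem_bridge (a b : List (Int × Int)) (L : List Int)
    (hL : ∀ x, x ∈ L ↔ x ∈ a.map Prod.fst ∨ x ∈ b.map Prod.fst) :
    ∀ x, x ∈ L.filter (cbDiff a b) ↔
      x ∈ (a.map Prod.fst).filter (cbDiff a b) ++ (b.map Prod.fst).filter (cbDiff2 a b) := by
  intro x
  simp only [List.mem_append, List.mem_filter]
  constructor
  · rintro ⟨hx, hd⟩
    rcases (hL x).1 hx with hxa | hxb
    · exact Or.inl ⟨hxa, hd⟩
    · by_cases hfa : (a.find? (fun p => p.1 == x)).isNone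
      · refine Or.inr ⟨hxb, ?_⟩
        unfold cbDiff2
        unfold cbDiff at hd
        rw [cbGetD_of_find?_none hfa] at hd
        simp only [hfa, Bool.true_and, bne_iff_ne, ne_eq] at hd ⊢
        omega
      · have : x ∈ a.map Prod.fst := by
          cases hf : a.find? (fun p => p.1 == x) with
          | none => rw [hf] at hfa; simp at hfa
          | some p =>
            have hp := List.find?_some hf
            have hpmem := List.mem_of_find?_eq_some hf
            simp only [beq_iff_eq] at hp
            rw [← hp]
            exact List.mem_map_of_mem hpmem
        exact Or.inl ⟨this, hd⟩
  · rintro (⟨hxa, hd⟩ | ⟨hxb, hd2⟩)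
    · exact ⟨(hL x).2 (Or.inl hxa), hd⟩
    · refine ⟨(hL x).2 (Or.inr hxb), ?_⟩
      unfold cbDiff2 at hd2
      simp only [Bool.and_eq_true] at hd2
      unfold cbDiff
      rw [cbGetD_of_find?_none hd2.1]
      simp only [bne_iff_ne, ne_eq] at hd2 ⊢
      omega

-- ===== VERDICT (by name: the statement is the Claim_ definition above) =====
theorem compare_blocks_spec : Claim_equal_compare_blocks := by
  intro a b _
  unfold Spec_compare_blocks compare_blocks compare_blocks_alt
  set S : List Int := PySem.Set.union (PySem.Set.ofList (a.map Prod.fst)) (b.map Prod.fst) with hS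
  set L : List Int := PySem.List.sorted S (fun k => k) true with hLdef
  -- B's two folds
  rw [foldl_step1 a b _ (none, 0) rfl]
  rw [foldl_step2 a b _ _ (by rfl)]
  simp only [omax_none_left]
  -- A's loop over the sorted key list
  have hnodupS : S.Nodup := PySem.Set.nodup_union _ _ (PySem.Set.nodup_ofList _)
  have hperm : L.Perm S := PySem.List.sorted_perm S (fun k => k) true
  have hnodupL : L.Nodup := hperm.symm.nodup hnodupS
  have hpw : L.Pairwise (fun p q : Int => q ≤ p) :=
    PySem.List.sorted_pairwise_rev S (fun k => k)
  have hstrict : L.Pairwise (fun p q : Int => q < p) := by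
    have := List.Pairwise.and hpw hnodupL
    exact this.imp (fun h => lt_of_le_of_ne h.1 (Ne.symm h.2))
  rw [loopA_eq a b L hstrict]
  -- bridge the two maxima
  have hmemL : ∀ x, x ∈ L ↔ x ∈ a.map Prod.fst ∨ x ∈ b.map Prod.fst := by
    intro x
    rw [hperm.mem_iff]
    rw [hS]
    rw [PySem.Set.mem_union]
    rw [PySem.Set.mem_ofList]
  rw [maxd_congr (filter_mem_bridge a b L hmemL), maxd_append]
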